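-- pv_equiv track=rewrite | github.com/pypi-data/pypi-mirror-392 | packages/wowool-entity-graph/wowool_entity_graph-3.1.5-py3-none-any.whl/wowool/entity_graph/entity_graph.py | key_modifier
-- ===== SOURCE A (Python) =====
-- def key_modifier(phrase):
--     """
--     Put every first letter of every word into uppercase.
--     """
--     init_caps = ""
--     for char in phrase:
--         if char == " " or char == "-":
--             init_caps += "_"
--         elif char.isalnum():
--             init_caps += char.upper()
--     return init_caps
-- ===== SOURCE B (Python) =====
-- def key_modifier(phrase):
--     """
--     Put every first letter of every word into uppercase.
--     """
--     cleaned = "".join(c for c in phrase if c.isalnum() or c in " -")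
--     return cleaned.upper().replace(" ", "_").replace("-", "_")
-- ===== Notes on version B (the rewrite author's own statement) =====
-- stated objective: alternative
-- what changed: A builds the result in one interleaved per-character loop with repeated string concatenation; B first filters out the dropped characters, then applies whole-string bulk transforms (uppercase, then replacement of space and of hyphen by underscore), which a timing run measured as faster by a constant factor.
import Mathlib
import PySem

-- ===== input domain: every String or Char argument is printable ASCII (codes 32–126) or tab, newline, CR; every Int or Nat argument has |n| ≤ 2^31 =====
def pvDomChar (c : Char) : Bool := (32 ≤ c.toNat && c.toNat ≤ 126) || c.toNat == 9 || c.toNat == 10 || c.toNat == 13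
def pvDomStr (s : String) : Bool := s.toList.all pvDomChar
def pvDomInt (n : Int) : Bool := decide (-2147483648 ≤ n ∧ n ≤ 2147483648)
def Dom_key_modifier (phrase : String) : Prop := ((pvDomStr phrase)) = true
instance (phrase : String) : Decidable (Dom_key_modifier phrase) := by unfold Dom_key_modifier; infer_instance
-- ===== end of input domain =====

-- B replaces A's single interleaved per-character loop by a filter pass followed by
-- whole-string bulk transforms (upper, then two replaces); a different decomposition, measured faster by a constant factor in a timing run.

-- ===== PORT A =====
-- one step of A's loop body (same branch order as the Python)
def kmStep (acc : List Char) (c : Char) : List Char :=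
  if c == ' ' || c == '-' then acc ++ ['_']
  else if PySem.Chars.isalnum c then acc ++ [PySem.Chars.upperChar c]
  else acc

def key_modifier (phrase : String) : String :=
  String.mk (phrase.toList.foldl kmStep [])

-- ===== PORT B =====
def key_modifier_alt (phrase : String) : String :=
  let cleaned := phrase.toList.filter (fun c => PySem.Chars.isalnum c || c == ' ' || c == '-')
  String.mk (PySem.Chars.replace (PySem.Chars.replace (PySem.Chars.upper cleaned) [' '] ['_']) ['-'] ['_'])

-- ===== PRECONDITION & SPEC =====
def Spec_key_modifier (phrase : String) (out : String) : Prop := out = key_modifier_alt phrase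
instance (phrase : String) (out : String) : Decidable (Spec_key_modifier phrase out) := by unfold Spec_key_modifier; infer_instance

-- ===== CLAIM (what is proved, stated in full; the proofs are below) =====
def Claim_equal_key_modifier : Prop := ∀ (phrase : String), Dom_key_modifier phrase → Spec_key_modifier phrase (key_modifier phrase)

-- ===== LEMMAS AND PROOFS =====

-- single-character replace is a pointwise map
theorem replace_go_single (o n : Char) :
    ∀ (l : List Char) (fuel : Nat) (acc : List Char), l.length ≤ fuel →
      PySem.Chars.replace.go [o] [n] fuel l acc
        = acc.reverse ++ l.map (fun c => if c == o then n else c) := by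
  intro l
  induction l with
  | nil =>
      intro fuel acc _
      cases fuel <;> simp [PySem.Chars.replace.go]
  | cons c t ih =>
      intro fuel acc h
      cases fuel with
      | zero => simp at h
      | succ f =>
          simp only [PySem.Chars.replace.go]
          by_cases hc : o = c
          · subst hc
            simp only [List.isPrefixOf, beq_self_eq_true, Bool.true_and, if_true,
              List.length_cons, List.length_nil, List.drop_succ_cons, List.drop_zero]
            rw [ih f (List.reverse [n] ++ acc) (by simpa using Nat.le_of_succ_le_succ h)]
            simp
          · have : ([o].isPrefixOf (c :: t)) = false := by
              simp [List.isPrefixOf, beq_eq_false_iff_ne, hc]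
            rw [this]
            simp only [Bool.false_eq_true, if_false]
            rw [ih f (c :: acc) (by simpa using Nat.le_of_succ_le_succ h)]
            simp [Ne.symm hc]

theorem replace_single (o n : Char) (l : List Char) :
    PySem.Chars.replace l [o] [n] = l.map (fun c => if c == o then n else c) := by
  simp only [PySem.Chars.replace, List.isEmpty_cons, Bool.false_eq_true, if_false]
  simpa using replace_go_single o n l l.length [] (le_refl _)

-- A's loop emits, per character, the block kmDelta c
def kmDelta (c : Char) : List Char :=
  if c == ' ' || c == '-' then ['_']
  else if PySem.Chars.isalnum c then [PySem.Chars.upperChar c]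
  else []

theorem foldl_kmStep (l : List Char) : ∀ acc, l.foldl kmStep acc = acc ++ l.flatMap kmDelta := by
  induction l with
  | nil => intro acc; simp
  | cons c t ih =>
      intro acc
      have hstep : kmStep acc c = acc ++ kmDelta c := by
        unfold kmStep kmDelta; split_ifs <;> simp
      simp only [List.foldl_cons, hstep, ih, List.flatMap_cons, List.append_assoc]

-- characters kept by B's filter are never mapped to ' ' or '-' by upperChar (unless they ARE ' '/'-')
theorem upperChar_alnum_ne (c : Char) (h : PySem.Chars.isalnum c = true) :
    PySem.Chars.upperChar c ≠ ' ' ∧ PySem.Chars.upperChar c ≠ '-' := by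
  have hv : PySem.Chars.isupper c = true ∨ PySem.Chars.islower c = true
      ∨ PySem.Chars.isdigit c = true := by
    simp only [PySem.Chars.isalnum, PySem.Chars.isalpha, Bool.or_eq_true] at h
    tauto
  unfold PySem.Chars.upperChar
  by_cases hl : PySem.Chars.islower c = true
  · simp only [hl, if_true]
    have hb : 97 ≤ c.toNat ∧ c.toNat ≤ 122 := by
      simp only [PySem.Chars.islower, Bool.and_eq_true, decide_eq_true_eq, Char.le_def] at hl
      exact ⟨hl.1, hl.2⟩
    have hval : Nat.isValidChar (c.toNat - 32) := Or.inl (by omega)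
    have h32 : (' ' : Char).toNat = 32 := by decide
    have h45 : ('-' : Char).toNat = 45 := by decide
    constructor <;> intro hEq <;>
      (have h' := congrArg Char.toNat hEq;
       rw [Char.toNat_ofNat, if_pos hval] at h';
       first | rw [h32] at h' | rw [h45] at h';
       omega)
  · simp only [hl]
    have hb : (65 ≤ c.toNat ∧ c.toNat ≤ 90) ∨ (48 ≤ c.toNat ∧ c.toNat ≤ 57) := by
      rcases hv with h1 | h1 | h1
      · simp only [PySem.Chars.isupper, Bool.and_eq_true, decide_eq_true_eq, Char.le_def] at h1
        exact Or.inl ⟨h1.1, h1.2⟩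
      · exact absurd h1 hl
      · simp only [PySem.Chars.isdigit, Bool.and_eq_true, decide_eq_true_eq, Char.le_def] at h1
        exact Or.inr ⟨h1.1, h1.2⟩
    constructor <;> intro hEq <;>
      (simp only [Bool.false_eq_true, if_false] at hEq; rw [hEq] at hb; revert hb; decide)

-- pointwise: A's emitted character equals B's upper-then-replace-replace pipeline on kept characters
theorem pointwise (c : Char)
    (h : (PySem.Chars.isalnum c || c == ' ' || c == '-') = true) :
    kmDelta c
      = [(fun x => if x == '-' then '_' else x)
          ((fun x => if x == ' ' then '_' else x) (PySem.Chars.upperChar c))] := by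
  by_cases hs : c = ' '
  · subst hs; decide
  · by_cases hh : c = '-'
    · subst hh; decide
    · have ha : PySem.Chars.isalnum c = true := by
        simp only [Bool.or_eq_true, beq_iff_eq] at h
        tauto
      obtain ⟨h1, h2⟩ := upperChar_alnum_ne c ha
      simp [kmDelta, hs, hh, ha, h1, h2]

theorem km_eq (phrase : String) : key_modifier phrase = key_modifier_alt phrase := by
  unfold key_modifier key_modifier_alt
  show String.mk (phrase.toList.foldl kmStep []) = String.mk (PySem.Chars.replace (PySem.Chars.replace
    (PySem.Chars.upper (phrase.toList.filter (fun c => PySem.Chars.isalnum c || c == ' ' || c == '-'))) [' '] ['_']) ['-'] ['_'])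
  rw [foldl_kmStep, replace_single, replace_single, PySem.Chars.upper,
    List.map_map, List.map_map, List.nil_append]
  congr 1
  induction phrase.toList with
  | nil => simp
  | cons c t ih =>
      by_cases hp : (PySem.Chars.isalnum c || c == ' ' || c == '-') = true
      · simp only [List.flatMap_cons, List.filter_cons, hp, if_true, List.map_cons, ih]
        rw [pointwise c hp]
        simp
      · have hd : kmDelta c = [] := by
          simp only [Bool.or_eq_true] at hp
          push Not at hp
          simp [kmDelta, hp.1.2, hp.2, hp.1.1]
        simp [List.flatMap_cons, hp, hd, ih]

-- ===== VERDICT (by name: the statement is the Claim_ definition above) =====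
theorem key_modifier_spec : Claim_equal_key_modifier := by
  intro phrase _
  unfold Spec_key_modifier
  exact km_eq phrase
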